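-- pv_equiv track=rewrite | github.com/cncaiprojem/projem | apps/api/app/core/cache.py | _lowercase_non_quoted
-- ===== SOURCE A (Python) =====
-- def _lowercase_non_quoted(text: str) -> str:
--     """Lowercase text except quoted strings."""
--     parts = []
--     in_quote = False
--     quote_char = None
--     current = []
--
--     for char in text:
--         if not in_quote and char in ('"', "'"):
--             if current:
--                 parts.append(''.join(current).lower())
--                 current = []
--             in_quote = True
--             quote_char = char
--             parts.append(char)
--         elif in_quote and char == quote_char:
--             parts.append(''.join(current))
--             parts.append(char)
--             current = []
--             in_quote = False
--             quote_char = None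
--         else:
--             current.append(char)
--
--     if current:
--         if in_quote:
--             parts.append(''.join(current))
--         else:
--             parts.append(''.join(current).lower())
--
--     return ''.join(parts)
-- ===== SOURCE B (Python) =====
-- def _lowercase_non_quoted(text: str) -> str:
--     """Lowercase text except quoted strings.
--
--     Chunk-based scan: instead of a per-character state machine, jump from
--     quote to quote with str.find and handle whole slices at once.
--     """
--     out = []
--     i = 0
--     n = len(text)
--     while i < n:
--         ch = text[i]
--         if ch in '"\'':
--             k = text.find(ch, i + 1)
--             if k == -1:
--                 # unterminated quote: keep the quote and the rest verbatim
--                 out.append(text[i:])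
--                 break
--             out.append(text[i:k + 1])
--             i = k + 1
--         else:
--             j = i + 1
--             while j < n and text[j] not in '"\'':
--                 j += 1
--             out.append(text[i:j].lower())
--             i = j
--     return ''.join(out)
-- ===== Notes on version B (the rewrite author's own statement) =====
-- stated objective: idiomatic
-- what changed: Replaces A's per-character state machine (in_quote flag, quote_char, current/parts accumulators) by a chunk-based scan that uses str.find to jump to the closing quote and emits whole slices (quoted verbatim, unquoted lowercased) at once.
import Mathlib
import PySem

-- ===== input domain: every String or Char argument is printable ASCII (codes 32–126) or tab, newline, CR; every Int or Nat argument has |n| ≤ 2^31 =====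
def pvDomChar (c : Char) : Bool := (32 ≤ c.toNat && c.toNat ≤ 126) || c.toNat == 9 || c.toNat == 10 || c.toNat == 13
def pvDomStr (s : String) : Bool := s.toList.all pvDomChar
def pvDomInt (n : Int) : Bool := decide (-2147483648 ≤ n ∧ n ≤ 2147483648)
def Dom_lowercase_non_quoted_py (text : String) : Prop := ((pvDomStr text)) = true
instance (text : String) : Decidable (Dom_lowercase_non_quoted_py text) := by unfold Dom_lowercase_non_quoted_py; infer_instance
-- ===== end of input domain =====

-- B replaces A's per-character state machine (in_quote flag + two accumulators) by a
-- chunk-based scan that jumps from quote to quote and handles whole slices at once (objective: idiomatic).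

-- ===== PORT A =====
-- one step of A's for-loop; state = (parts, in_quote, quote_char, current)
def aStep (st : List (List Char) × Bool × Option Char × List Char) (c : Char) :
    List (List Char) × Bool × Option Char × List Char :=
  match st with
  | (parts, inq, qc, cur) =>
    if inq = false ∧ (c = '"' ∨ c = '\'') then
      ((if cur ≠ [] then parts ++ [PySem.Chars.lower cur] else parts) ++ [[c]], true, some c, [])
    else if inq = true ∧ some c = qc then
      (parts ++ [cur, [c]], false, none, [])
    else
      (parts, inq, qc, cur ++ [c])

-- the final flush after the loop, then ''.join(parts)
def aFinish (st : List (List Char) × Bool × Option Char × List Char) : List Char :=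
  match st with
  | (parts, inq, _, cur) =>
    (if cur ≠ [] then parts ++ [if inq then cur else PySem.Chars.lower cur] else parts).flatten

def lowercase_non_quoted_py (text : String) : String :=
  String.mk (aFinish (text.toList.foldl aStep ([], false, none, [])))

-- ===== PORT B =====
def bIsQuote (c : Char) : Bool := c = '"' || c = '\''

-- text.find(q, i+1) together with the two slices around the found quote:
-- some (inside, after) when q occurs, none when it does not (find returned -1)
def bFindClose (q : Char) : List Char → Option (List Char × List Char)
  | [] => none
  | c :: rest =>
    if c = q then some ([], rest)
    else
      match bFindClose q rest with
      | some (ins, aft) => some (c :: ins, aft)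
      | none => none

theorem bFindClose_length {q : Char} : ∀ {l ins aft : List Char},
    bFindClose q l = some (ins, aft) → aft.length < l.length := by
  intro l
  induction l with
  | nil => intro ins aft h; simp [bFindClose] at h
  | cons c rest ih =>
    intro ins aft h
    simp only [bFindClose] at h
    split at h
    · cases h; simp
    · cases hrec : bFindClose q rest with
      | none => rw [hrec] at h; cases h
      | some p =>
        rw [hrec] at h
        cases p with
        | mk i a =>
          cases h
          have := ih hrec
          simp
          omega

-- the while loop of B: at a quote, look for the closing quote and emit the whole
-- quoted slice verbatim; otherwise emit the lowercased run up to the next quote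
def bGo : List Char → List Char
  | [] => []
  | c :: rest =>
    if bIsQuote c then
      match h : bFindClose c rest with
      | some (ins, aft) => (c :: ins ++ [c]) ++ bGo aft
      | none => c :: rest
    else
      PySem.Chars.lower (c :: rest.takeWhile (fun x => !bIsQuote x)) ++
        bGo (rest.dropWhile (fun x => !bIsQuote x))
termination_by l => l.length
decreasing_by
  · have := bFindClose_length h; simp; omega
  · have := List.length_dropWhile_le (p := fun x => !bIsQuote x) (l := rest); simp; omega

def lowercase_non_quoted_py_alt (text : String) : String :=
  String.mk (bGo text.toList)

-- ===== PRECONDITION & SPEC =====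
def Spec_lowercase_non_quoted_py (text : String) (out : String) : Prop := out = lowercase_non_quoted_py_alt text
instance (text : String) (out : String) : Decidable (Spec_lowercase_non_quoted_py text out) := by unfold Spec_lowercase_non_quoted_py; infer_instance

-- ===== CLAIM (what is proved, stated in full; the proofs are below) =====
def Claim_equal_lowercase_non_quoted_py : Prop := ∀ (text : String), Dom_lowercase_non_quoted_py text → Spec_lowercase_non_quoted_py text (lowercase_non_quoted_py text)

-- ===== LEMMAS AND PROOFS =====

theorem lower_nil : PySem.Chars.lower [] = [] := rfl

-- bGo absorbs a leading non-quote run as its lowercased image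
theorem bGo_run (l : List Char) :
    bGo l = PySem.Chars.lower (l.takeWhile (fun x => !bIsQuote x)) ++
      bGo (l.dropWhile (fun x => !bIsQuote x)) := by
  cases l with
  | nil => simp [bGo, PySem.Chars.lower]
  | cons c rest =>
    by_cases hq : bIsQuote c = true
    · simp [List.takeWhile_cons, List.dropWhile_cons, hq, PySem.Chars.lower]
    · rw [bGo]
      simp [List.takeWhile_cons, List.dropWhile_cons, hq]

-- joint loop invariant for A's fold, in-quote (P1) and not-in-quote (P2) states,
-- by strong induction on the length of the remaining input
theorem loop_inv : ∀ (n : Nat) (l : List Char), l.length ≤ n →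
    (∀ (parts : List (List Char)) (q : Char) (cur : List Char), bIsQuote q = true →
      aFinish (l.foldl aStep (parts, true, some q, cur)) =
        parts.flatten ++ cur ++
          (match bFindClose q l with
           | some (ins, aft) => ins ++ [q] ++ bGo aft
           | none => l)) ∧
    (∀ (parts : List (List Char)) (cur : List Char),
      aFinish (l.foldl aStep (parts, false, none, cur)) =
        parts.flatten ++ PySem.Chars.lower cur ++ bGo l) := by
  intro n
  induction n with
  | zero =>
    intro l hl
    have : l = [] := List.eq_nil_of_length_eq_zero (Nat.le_zero.mp hl)
    subst this
    constructor
    · intro parts q cur _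
      by_cases hc : cur = [] <;>
        simp [aFinish, bFindClose, hc]
    · intro parts cur
      by_cases hc : cur = [] <;>
        simp [aFinish, bGo, hc, PySem.Chars.lower]
  | succ n ih =>
    intro l hl
    cases l with
    | nil => exact ih [] (by simp)
    | cons c rest =>
      have hrest : rest.length ≤ n := by simp at hl; omega
      constructor
      · -- in-quote state
        intro parts q cur hq
        by_cases hc : c = q
        · subst hc
          simp only [List.foldl_cons, aStep]
          rw [if_neg (by simp), if_pos (by simp)]
          rw [(ih rest hrest).2]
          simp [bFindClose, lower_nil]
        · simp only [List.foldl_cons, aStep]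
          rw [if_neg (by simp), if_neg (by simp [hc])]
          rw [(ih rest hrest).1 _ q _ hq]
          simp only [bFindClose, if_neg hc]
          cases hfc : bFindClose q rest with
          | none => simp
          | some p => cases p; simp
      · -- not-in-quote state
        intro parts cur
        by_cases hq : bIsQuote c = true
        · have hc : c = '"' ∨ c = '\'' := by
            simp [bIsQuote] at hq
            rcases hq with h | h <;> [left; right] <;> exact h
          simp only [List.foldl_cons, aStep]
          rw [if_pos (show True ∧ (c = '"' ∨ c = '\'') from ⟨trivial, hc⟩)]
          rw [(ih rest hrest).1 _ c _ hq]
          rw [bGo]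
          rw [if_pos hq]
          by_cases hcur : cur = []
          · subst hcur
            cases hfc : bFindClose c rest with
            | none => simp [PySem.Chars.lower]
            | some p => cases p; simp [PySem.Chars.lower]
          · cases hfc : bFindClose c rest with
            | none => simp [hcur, PySem.Chars.lower]
            | some p => cases p; simp [hcur, PySem.Chars.lower]
        · simp only [List.foldl_cons, aStep]
          rw [if_neg (by simp [bIsQuote] at hq; tauto), if_neg (by simp)]
          rw [(ih rest hrest).2, bGo_run rest]
          conv_rhs => rw [bGo_run (c :: rest)]
          simp [List.takeWhile_cons, List.dropWhile_cons, hq, PySem.Chars.lower]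

-- ===== VERDICT (by name: the statement is the Claim_ definition above) =====
theorem lowercase_non_quoted_py_spec : Claim_equal_lowercase_non_quoted_py := by
  intro text _
  unfold Spec_lowercase_non_quoted_py lowercase_non_quoted_py lowercase_non_quoted_py_alt
  have h := (loop_inv text.toList.length text.toList le_rfl).2 [] []
  rw [h]
  simp [PySem.Chars.lower]
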